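-- pv_equiv track=rewrite | github.com/dotcom07/data-structure | ai_2021123119_6-1.py | answer_Q
-- ===== SOURCE A (Python) =====
-- def answer_Q(n,i,j):
--     if n == 0:
--         return 1
--     else:
--         size = 3**n
--         batch = size // 3
--         if (i <=batch and j<=batch):
--             return answer_Q(n-1,i,j)
--         elif ( i <=batch and  (size-(batch-1) <= j <= size) ) :
--             return answer_Q(n-1,i, j - ( batch * 2 ))
--         elif (1+batch <= i <=batch+batch) and (1+batch <= j <= batch+batch ) :
--             return answer_Q(n-1,i - batch, j - batch)
--         elif ( (size-(batch-1) <= i <= size ) and j<=batch) :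
--             return answer_Q(n-1,i - ( batch * 2 ),j)
--         elif ( (size-(batch-1) <= i <= size) and (size-(batch-1) <= j <= size) ) :
--             return answer_Q(n-1,i - ( batch * 2 ),j - ( batch * 2 ))
--         else :
--             return (2*(n-1)+3)
-- ===== SOURCE B (Python) =====
-- def answer_Q(n, i, j):
--     while n > 0:
--         batch = 3 ** (n - 1)
--         if i > 3 * batch or j > 3 * batch:
--             return 2 * n + 1
--         qi = 0 if i <= batch else (1 if i <= 2 * batch else 2)
--         qj = 0 if j <= batch else (1 if j <= 2 * batch else 2)
--         if qi == qj or (qi != 1 and qj != 1):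
--             i -= qi * batch
--             j -= qj * batch
--             n -= 1
--         else:
--             return 2 * n + 1
--     return 1
-- ===== Notes on version B (the rewrite author's own statement) =====
-- stated objective: alternative
-- what changed: Replaced the five-branch boundary-interval recursion by an iterative loop that classifies each coordinate into its third (0/1/2) and tests one combined allow-condition, subtracting qi*batch/qj*batch per level.
-- outside the precondition, e.g. on answer_Q(-1, 1, 0): A returns -1, B returns 1; on answer_Q(-1, 0, 0): A raises RecursionError, B returns 1
import Mathlib
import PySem

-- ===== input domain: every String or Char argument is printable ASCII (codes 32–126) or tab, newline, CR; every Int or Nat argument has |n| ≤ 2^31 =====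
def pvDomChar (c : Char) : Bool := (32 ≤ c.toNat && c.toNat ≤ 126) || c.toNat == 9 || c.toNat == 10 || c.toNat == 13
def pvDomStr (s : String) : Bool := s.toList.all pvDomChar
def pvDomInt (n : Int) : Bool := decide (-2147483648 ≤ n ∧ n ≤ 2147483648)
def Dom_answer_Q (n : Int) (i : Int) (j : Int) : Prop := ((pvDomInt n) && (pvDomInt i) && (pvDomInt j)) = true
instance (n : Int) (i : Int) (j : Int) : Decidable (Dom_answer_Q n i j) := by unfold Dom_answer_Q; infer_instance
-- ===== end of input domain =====

-- B replaces A's five-branch interval recursion by an iterative loop classifying each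
-- coordinate into its third (alternative decomposition, same cost; return value only).

-- ===== PORT A =====
-- A recurses on n; for n < 0 the Python recursion never terminates (RecursionError),
-- so the port recurses on n.toNat and Pre_ excludes n < 0.
def answer_Q_go : Nat → Int → Int → Int
  | 0, _, _ => 1
  | m + 1, i, j =>
    let n : Int := (m : Int) + 1
    let size : Int := 3 ^ (m + 1)
    let batch : Int := PySem.Int.floordiv size 3
    if i ≤ batch ∧ j ≤ batch then
      answer_Q_go m i j
    else if i ≤ batch ∧ (size - (batch - 1) ≤ j ∧ j ≤ size) then
      answer_Q_go m i (j - batch * 2)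
    else if (1 + batch ≤ i ∧ i ≤ batch + batch) ∧ (1 + batch ≤ j ∧ j ≤ batch + batch) then
      answer_Q_go m (i - batch) (j - batch)
    else if (size - (batch - 1) ≤ i ∧ i ≤ size) ∧ j ≤ batch then
      answer_Q_go m (i - batch * 2) j
    else if (size - (batch - 1) ≤ i ∧ i ≤ size) ∧ (size - (batch - 1) ≤ j ∧ j ≤ size) then
      answer_Q_go m (i - batch * 2) (j - batch * 2)
    else
      2 * (n - 1) + 3

def answer_Q (n : Int) (i : Int) (j : Int) : Int := answer_Q_go n.toNat i j

-- ===== PORT B =====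
-- B's while-loop: the Nat argument is the loop variable n, decremented each pass.
def answer_Q_alt_go : Nat → Int → Int → Int
  | 0, _, _ => 1
  | m + 1, i, j =>
    let batch : Int := 3 ^ m
    if 3 * batch < i ∨ 3 * batch < j then 2 * ((m : Int) + 1) + 1
    else
      let qi : Int := if i ≤ batch then 0 else if i ≤ 2 * batch then 1 else 2
      let qj : Int := if j ≤ batch then 0 else if j ≤ 2 * batch then 1 else 2
      if qi = qj ∨ (qi ≠ 1 ∧ qj ≠ 1) then
        answer_Q_alt_go m (i - qi * batch) (j - qj * batch)
      else 2 * ((m : Int) + 1) + 1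

def answer_Q_alt (n : Int) (i : Int) (j : Int) : Int := answer_Q_alt_go n.toNat i j

-- ===== PRECONDITION & SPEC =====
-- Pre_ excludes negative levels n < 0, outside the fractal's natural domain, where A either
-- recurses forever (RecursionError) or returns an accidental float-arithmetic fall-through value.
def Pre_answer_Q (n : Int) (i : Int) (j : Int) : Prop := 0 ≤ n
instance (n : Int) (i : Int) (j : Int) : Decidable (Pre_answer_Q n i j) := by unfold Pre_answer_Q; infer_instance
def pvWitness_answer_Q : Int × Int × Int := (2, 3, 5)

def Spec_answer_Q (n : Int) (i : Int) (j : Int) (out : Int) : Prop := out = answer_Q_alt n i j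
instance (n : Int) (i : Int) (j : Int) (out : Int) : Decidable (Spec_answer_Q n i j out) := by unfold Spec_answer_Q; infer_instance

-- ===== CLAIM (what is proved, stated in full; the proofs are below) =====
def Claim_equal_answer_Q : Prop := ∀ (n : Int) (i : Int) (j : Int), Dom_answer_Q n i j → Pre_answer_Q n i j → Spec_answer_Q n i j (answer_Q n i j)

-- ===== LEMMAS AND PROOFS =====

lemma answer_Q_go_eq_alt (k : Nat) : ∀ (i j : Int), answer_Q_go k i j = answer_Q_alt_go k i j := by
  induction k with
  | zero => intro i j; rfl
  | succ m ih =>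
    intro i j
    have hb : (0:Int) < 3 ^ m := by positivity
    have hsize : ((3:Int) ^ (m + 1)) = 3 * 3 ^ m := by ring
    have hbatch : PySem.Int.floordiv ((3:Int) ^ (m + 1)) 3 = 3 ^ m := by
      rw [hsize, PySem.Int.floordiv_eq_ediv_of_pos (by norm_num)]
      exact Int.mul_ediv_cancel_left _ (by norm_num)
    simp only [answer_Q_go, answer_Q_alt_go, hbatch]
    simp only [hsize]
    set b : Int := 3 ^ m with hbdef
    split_ifs <;>
      first
        | rfl
        | omega
        | (rw [ih]; congr 2 <;> omega)

-- ===== VERDICT (by name: the statement is the Claim_ definition above) =====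
theorem answer_Q_spec : Claim_equal_answer_Q := by
  intro n i j _ _
  unfold Spec_answer_Q answer_Q answer_Q_alt
  exact answer_Q_go_eq_alt n.toNat i j
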